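-- pv_equiv track=rewrite | github.com/Unknownflow/CS1010X | PracticalExam/2016/practical-template.py | count_longest_streak
-- ===== SOURCE A (Python) =====
-- def count_longest_streak(a):
--     # Write your solution here
--     curr_len = 1
--     max_len = 1
--     a_str = str(a)
--     for i in range(1, len(a_str)):
--         if a_str[i] != a_str[i-1]:
--             curr_len = 1
--         else:
--             curr_len += 1
--             if curr_len > max_len:
--                 max_len = curr_len
--
--     return max_len
-- ===== SOURCE B (Python) =====
-- from itertools import groupby
--
-- def count_longest_streak(a):
--     return max((sum(1 for _ in g) for _, g in groupby(str(a))), default=1)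
-- ===== Notes on version B (the rewrite author's own statement) =====
-- stated objective: idiomatic
-- what changed: Replaces the index loop with inline curr/max counters by itertools.groupby over str(a): split into maximal runs of identical characters and take the max of their lengths (default=1 matches A's empty-string result).
import Mathlib
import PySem

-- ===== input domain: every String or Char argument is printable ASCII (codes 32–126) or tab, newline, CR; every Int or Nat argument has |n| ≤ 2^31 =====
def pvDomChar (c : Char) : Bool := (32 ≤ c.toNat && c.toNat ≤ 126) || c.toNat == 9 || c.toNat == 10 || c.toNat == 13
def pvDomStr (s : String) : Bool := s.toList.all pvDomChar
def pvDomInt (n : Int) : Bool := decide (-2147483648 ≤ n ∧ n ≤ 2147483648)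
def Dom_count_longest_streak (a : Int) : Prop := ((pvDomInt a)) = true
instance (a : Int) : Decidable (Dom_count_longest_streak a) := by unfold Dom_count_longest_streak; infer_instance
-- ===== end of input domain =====

-- B rewrites A's inline curr/max counter loop as itertools.groupby runs + max of run lengths (idiomatic; same cost).

-- ===== PORT A =====
-- literal port of A: single pass over indices 1..len-1 of str(a), state (curr_len, max_len)
def count_longest_streak (a : Int) : Int :=
  let a_str := PySem.Int.toChars a
  ((PySem.List.pyRange 1 (a_str.length : Int) 1).foldl
    (fun (st : Int × Int) i =>
      if PySem.List.pyGetD a_str i ' ' ≠ PySem.List.pyGetD a_str (i - 1) ' ' then (1, st.2)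
      else if st.1 + 1 > st.2 then (st.1 + 1, st.1 + 1) else (st.1 + 1, st.2))
    (1, 1)).2

-- ===== PORT B =====
-- port of itertools.groupby over str(a), yielding the length of each maximal run of equal chars
def pvRuns : Char → Int → List Char → List Int
  | _, n, [] => [n]
  | c, n, d :: rest => if d == c then pvRuns c (n + 1) rest else n :: pvRuns d 1 rest

def count_longest_streak_alt (a : Int) : Int :=
  let runs : List Int :=
    match PySem.Int.toChars a with
    | [] => []
    | c :: rest => pvRuns c 1 rest
  (PySem.List.max? runs (fun y => y)).getD 1   -- max(…, default=1)

-- ===== PRECONDITION & SPEC =====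
def Spec_count_longest_streak (a : Int) (out : Int) : Prop := out = count_longest_streak_alt a
instance (a : Int) (out : Int) : Decidable (Spec_count_longest_streak a out) := by unfold Spec_count_longest_streak; infer_instance

-- ===== CLAIM (what is proved, stated in full; the proofs are below) =====
def Claim_equal_count_longest_streak : Prop := ∀ (a : Int), Dom_count_longest_streak a → Spec_count_longest_streak a (count_longest_streak a)

-- ===== LEMMAS AND PROOFS =====

-- A's loop body as a step on (prev char, next char)
def pvStep (prev d : Char) (st : Int × Int) : Int × Int :=
  if d ≠ prev then (1, st.2)
  else if st.1 + 1 > st.2 then (st.1 + 1, st.1 + 1) else (st.1 + 1, st.2)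

-- A's loop as a structural walk over the tail of the string
def pvWalk : Char → Int × Int → List Char → Int × Int
  | _, st, [] => st
  | prev, st, d :: rest => pvWalk d (pvStep prev d st) rest

theorem pvGetD_append_cons (pre : List Char) (x : Char) (t : List Char) (d : Char) :
    (pre ++ x :: t).getD pre.length d = x := by
  simp [List.getD_eq_getElem?_getD]

-- the index loop of A equals the structural walk
theorem pv_loop_eq (s : List Char) : ∀ (rest pre : List Char) (prev : Char) (st : Int × Int),
    s = pre ++ prev :: rest →
    (PySem.List.pyRange ((pre.length : Int) + 1) (s.length : Int) 1).foldl
      (fun (st : Int × Int) i =>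
        if PySem.List.pyGetD s i ' ' ≠ PySem.List.pyGetD s (i - 1) ' ' then (1, st.2)
        else if st.1 + 1 > st.2 then (st.1 + 1, st.1 + 1) else (st.1 + 1, st.2)) st
      = pvWalk prev st rest := by
  intro rest
  induction rest with
  | nil =>
      intro pre prev st hs
      rw [PySem.List.pyRange_one_eq_nil (by simp [hs])]
      rfl
  | cons d rest ih =>
      intro pre prev st hs
      have hlen : (pre.length : Int) + 1 < (s.length : Int) := by simp [hs]
      rw [PySem.List.pyRange_one_cons hlen]
      simp only [List.foldl_cons]
      have h1 : PySem.List.pyGetD s ((pre.length : Int) + 1) ' ' = d := by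
        have : ((pre.length : Int) + 1) = ((pre.length + 1 : Nat) : Int) := by push_cast; ring
        rw [this, PySem.List.pyGetD_natCast, hs]
        have : pre.length + 1 = (pre ++ [prev]).length := by simp
        rw [this]
        simpa using pvGetD_append_cons (pre ++ [prev]) d rest ' '
      have h2 : PySem.List.pyGetD s ((pre.length : Int) + 1 - 1) ' ' = prev := by
        have : ((pre.length : Int) + 1 - 1) = ((pre.length : Nat) : Int) := by ring
        rw [this, PySem.List.pyGetD_natCast, hs, pvGetD_append_cons]
      rw [h1, h2]
      have hstep :
          (if d ≠ prev then ((1 : Int), st.2)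
           else if st.1 + 1 > st.2 then (st.1 + 1, st.1 + 1) else (st.1 + 1, st.2))
          = pvStep prev d st := rfl
      rw [hstep]
      have hs' : s = (pre ++ [prev]) ++ d :: rest := by simp [hs]
      have := ih (pre ++ [prev]) d (pvStep prev d st) hs'
      have hl : ((pre ++ [prev]).length : Int) + 1 = (pre.length : Int) + 1 + 1 := by
        simp
      rw [hl] at this
      rw [this]
      rfl

-- folding max over the runs does not see accumulator changes absorbed by the head run
theorem pv_foldl_max_congr : ∀ (rest : List Char) (c : Char) (n m₁ m₂ : Int),
    max m₁ n = max m₂ n →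
    (pvRuns c n rest).foldl max m₁ = (pvRuns c n rest).foldl max m₂ := by
  intro rest
  induction rest with
  | nil => intro c n m₁ m₂ h; simpa [pvRuns] using h
  | cons d rest ih =>
      intro c n m₁ m₂ h
      by_cases hd : d = c
      · simp only [pvRuns, hd, beq_self_eq_true, if_true]
        exact ih c (n + 1) m₁ m₂ (by omega)
      · simp only [pvRuns, beq_iff_eq, hd, if_false, List.foldl_cons]
        rw [h]

-- every run list starts with a run of length ≥ the running count
theorem pvRuns_cons : ∀ (rest : List Char) (c : Char) (n : Int),
    ∃ x t, pvRuns c n rest = x :: t ∧ n ≤ x := by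
  intro rest
  induction rest with
  | nil => intro c n; exact ⟨n, [], rfl, le_refl n⟩
  | cons d rest ih =>
      intro c n
      by_cases hd : d = c
      · obtain ⟨x, t, hx, hle⟩ := ih c (n + 1)
        exact ⟨x, t, by simp [pvRuns, hd, hx], by omega⟩
      · exact ⟨n, pvRuns d 1 rest, by simp [pvRuns, hd], le_refl n⟩

-- A's walk computes the max of the run lengths
theorem pv_walk_eq : ∀ (rest : List Char) (prev : Char) (curr mx : Int),
    1 ≤ curr → curr ≤ mx →
    (pvWalk prev (curr, mx) rest).2 = (pvRuns prev curr rest).foldl max mx := by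
  intro rest
  induction rest with
  | nil => intro prev curr mx h1 h2; simp [pvWalk, pvRuns]; omega
  | cons d rest ih =>
      intro prev curr mx h1 h2
      by_cases hd : d = prev
      · subst hd
        have hstep : pvStep d d (curr, mx) = (curr + 1, max mx (curr + 1)) := by
          simp only [pvStep, ne_eq, not_true_eq_false, if_false]
          split_ifs with h <;> (simp only [Prod.mk.injEq]; exact ⟨trivial, by omega⟩)
        simp only [pvWalk, hstep]
        rw [ih d (curr + 1) (max mx (curr + 1)) (by omega) (by omega)]
        simp only [pvRuns, beq_self_eq_true, if_true]
        exact pv_foldl_max_congr rest d (curr + 1) (max mx (curr + 1)) mx (by omega)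
      · have hstep : pvStep prev d (curr, mx) = (1, mx) := by simp [pvStep, hd]
        simp only [pvWalk, hstep]
        rw [ih d 1 mx (le_refl 1) (by omega)]
        simp only [pvRuns, beq_iff_eq, hd, if_false, List.foldl_cons]
        have : max mx curr = mx := by omega
        rw [this]

-- ===== VERDICT (by name: the statement is the Claim_ definition above) =====
theorem count_longest_streak_spec : Claim_equal_count_longest_streak := by
  intro a _
  unfold Spec_count_longest_streak count_longest_streak count_longest_streak_alt
  cases hch : PySem.Int.toChars a with
  | nil =>
      simp only [hch]
      rw [PySem.List.pyRange_one_eq_nil (by simp)]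
      rfl
  | cons c rest =>
      simp only [hch]
      have hloop := pv_loop_eq (c :: rest) rest [] c (1, 1) (by simp)
      simp only [List.length_nil, Nat.cast_zero, zero_add] at hloop
      rw [hloop]
      rw [pv_walk_eq rest c 1 1 (le_refl 1) (le_refl 1)]
      obtain ⟨x, t, hx, hle⟩ := pvRuns_cons rest c 1
      rw [hx, PySem.List.max?_id_cons]
      simp only [List.foldl_cons, Option.getD_some]
      have : max (1 : Int) x = x := by omega
      rw [this]
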